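-- pv_equiv track=rewrite | github.com/weiliping/codingbasics | src/main/py/interviewbit/Stacks_and_Queues/sortedSum.py | sortedSum
-- ===== SOURCE A (Python) =====
-- MAX_V = 10 ** 9 + 7
--
-- def sortedSum(a):
--     # Write your code here
--     from bisect import bisect, insort
--     res = 0
--     n = len(a)
--     sub_arr = []
--     pre_sum = 0
--     for i in range(n):
--         j = bisect(sub_arr, a[i])
--         curr_sum = pre_sum
--         curr_sum += (j + 1) * a[i]
--         if curr_sum >= MAX_V:
--             curr_sum %= MAX_V
--         if j < len(sub_arr):
--             curr_sum += sum(sub_arr[j:])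
--             if curr_sum >= MAX_V:
--                 curr_sum %= MAX_V
--         insort(sub_arr, a[i])
--         pre_sum = curr_sum
--         res += curr_sum
--         if res >= MAX_V:
--             res %= MAX_V
--     return res
-- ===== SOURCE B (Python) =====
-- MAX_V = 10 ** 9 + 7
--
-- def sortedSum(a):
--     # One plain scan of the already-seen prefix per element: no sorted
--     # container, no bisect/insort, no slicing.
--     res = 0
--     pre = 0
--     seen = []
--     for x in a:
--         gts = [y for y in seen if y > x]
--         le = len(seen) - len(gts)
--         cur = pre + (le + 1) * x
--         if cur >= MAX_V:
--             cur %= MAX_V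
--         if le < len(seen):
--             cur += sum(gts)
--             if cur >= MAX_V:
--                 cur %= MAX_V
--         seen.append(x)
--         pre = cur
--         res += cur
--         if res >= MAX_V:
--             res %= MAX_V
--     return res
-- ===== Notes on version B (the rewrite author's own statement) =====
-- stated objective: simpler
-- what changed: B drops A's maintained sorted array (bisect insertion point, insort, slice-suffix-sum) and instead does one plain scan of the already-seen prefix per element, counting elements ≤ x and summing elements > x directly.
import Mathlib
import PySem

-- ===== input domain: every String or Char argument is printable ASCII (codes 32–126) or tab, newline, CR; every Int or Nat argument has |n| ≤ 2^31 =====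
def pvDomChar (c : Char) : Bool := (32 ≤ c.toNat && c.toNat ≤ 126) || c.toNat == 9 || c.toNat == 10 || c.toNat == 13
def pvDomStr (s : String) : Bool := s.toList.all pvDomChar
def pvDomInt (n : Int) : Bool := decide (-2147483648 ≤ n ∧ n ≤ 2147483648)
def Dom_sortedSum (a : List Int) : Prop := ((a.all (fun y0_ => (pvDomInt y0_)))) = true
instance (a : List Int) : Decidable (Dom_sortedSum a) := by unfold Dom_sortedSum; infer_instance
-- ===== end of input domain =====

-- B replaces A's maintained sorted array (bisect/insort/slice-sum) by one plain scan of
-- the already-seen prefix per element; same result, simpler code (objective: simpler).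

-- ===== PORT A =====
-- bisect.bisect(l, x) on the sorted list l: the insertion point, i.e. the length of the
-- initial run of elements ≤ x (exact: sub_arr is kept sorted by insort)
def pvBisectR (l : List Int) (x : Int) : Nat := (l.takeWhile (fun y => decide (y ≤ x))).length

-- bisect.insort(l, x) on the sorted list l: order-preserving insertion after equal elements
def pvInsortR (x : Int) : List Int → List Int
  | [] => [x]
  | h :: t => if x < h then x :: h :: t else h :: pvInsortR x t

-- one iteration of A's loop body; state = (res, sub_arr, pre_sum)
def sortedSumStepA (st : Int × List Int × Int) (x : Int) : Int × List Int × Int :=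
  let res := st.1; let sub := st.2.1; let pre := st.2.2
  let j := pvBisectR sub x
  let c1 := pre + ((j : Int) + 1) * x
  let c2 := if c1 ≥ 1000000007 then PySem.Int.mod c1 1000000007 else c1
  -- sum(sub_arr[j:]) : 0 ≤ j, so the slice is List.drop j (exact)
  let c3 := if j < sub.length then
              let c := c2 + (sub.drop j).sum
              if c ≥ 1000000007 then PySem.Int.mod c 1000000007 else c
            else c2
  let res' := res + c3
  (if res' ≥ 1000000007 then PySem.Int.mod res' 1000000007 else res', pvInsortR x sub, c3)

-- for i in range(n) with a[i]: reads the elements of a in order (exact)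
def sortedSum (a : List Int) : Int := (a.foldl sortedSumStepA (0, [], 0)).1

-- ===== PORT B =====
-- one iteration of B's loop body; state = (res, seen, pre)
def sortedSumStepB (st : Int × List Int × Int) (x : Int) : Int × List Int × Int :=
  let res := st.1; let seen := st.2.1; let pre := st.2.2
  let gts := seen.filter (fun y => decide (x < y))   -- [y for y in seen if y > x]
  let le : Int := (seen.length : Int) - (gts.length : Int)
  let c1 := pre + (le + 1) * x
  let c2 := if c1 ≥ 1000000007 then PySem.Int.mod c1 1000000007 else c1
  let c3 := if le < (seen.length : Int) then
              let c := c2 + gts.sum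
              if c ≥ 1000000007 then PySem.Int.mod c 1000000007 else c
            else c2
  let res' := res + c3
  (if res' ≥ 1000000007 then PySem.Int.mod res' 1000000007 else res', seen ++ [x], c3)

def sortedSum_alt (a : List Int) : Int := (a.foldl sortedSumStepB (0, [], 0)).1

-- ===== PRECONDITION & SPEC =====
def Spec_sortedSum (a : List Int) (out : Int) : Prop := out = sortedSum_alt a
instance (a : List Int) (out : Int) : Decidable (Spec_sortedSum a out) := by unfold Spec_sortedSum; infer_instance

-- ===== CLAIM (what is proved, stated in full; the proofs are below) =====
def Claim_equal_sortedSum : Prop := ∀ (a : List Int), Dom_sortedSum a → Spec_sortedSum a (sortedSum a)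

-- ===== LEMMAS AND PROOFS =====

-- counting ≤ x and counting > x partition the length
theorem countP_le_add_gt (x : Int) :
    ∀ (l : List Int),
      l.countP (fun y => decide (y ≤ x)) + l.countP (fun y => decide (x < y)) = l.length
  | [] => rfl
  | h :: t => by
    have ih := countP_le_add_gt x t
    by_cases hx : h ≤ x
    · have h1 : (decide (h ≤ x)) = true := decide_eq_true hx
      have h2 : (decide (x < h)) = false := decide_eq_false (not_lt.mpr hx)
      simp only [List.countP_cons, h1, h2, if_true, Bool.false_eq_true, if_false,
        List.length_cons]
      omega
    · have h1 : (decide (h ≤ x)) = false := decide_eq_false hx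
      have h2 : (decide (x < h)) = true := decide_eq_true (lt_of_not_ge hx)
      simp only [List.countP_cons, h1, h2, if_true, Bool.false_eq_true, if_false,
        List.length_cons]
      omega

-- helper: dropping the takeWhile-prefix is dropWhile
theorem drop_len_takeWhile (p : Int → Bool) :
    ∀ (l : List Int), l.drop (l.takeWhile p).length = l.dropWhile p
  | [] => rfl
  | h :: t => by
    by_cases hp : p h
    · simp [hp, drop_len_takeWhile p t]
    · simp [hp]

-- on a ≤-sorted list, takeWhile (· ≤ x) = filter (· ≤ x)
theorem sorted_takeWhile_eq_filter (x : Int) :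
    ∀ (l : List Int), l.Pairwise (· ≤ ·) →
      l.takeWhile (fun y => decide (y ≤ x)) = l.filter (fun y => decide (y ≤ x)) := by
  intro l hl
  induction l with
  | nil => rfl
  | cons h t ih =>
    rcases List.pairwise_cons.mp hl with ⟨hle, ht⟩
    by_cases hx : h ≤ x
    · simp [hx, ih ht]
    · have hnil : (h :: t).filter (fun y => decide (y ≤ x)) = [] := by
        rw [List.filter_eq_nil_iff]
        intro y hy
        simp only [decide_eq_true_eq]
        intro hyx
        rcases List.mem_cons.mp hy with rfl | hy'
        · exact hx hyx
        · exact hx (le_trans (hle y hy') hyx)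
      rw [hnil]
      simp [hx]

-- on a ≤-sorted list, dropping the takeWhile-prefix leaves exactly the elements > x
theorem sorted_drop_eq_filter (x : Int) (l : List Int) (hl : l.Pairwise (· ≤ ·)) :
    l.drop (l.takeWhile (fun y => decide (y ≤ x))).length
      = l.filter (fun y => decide (x < y)) := by
  rw [drop_len_takeWhile]
  induction l with
  | nil => rfl
  | cons h t ih =>
    rcases List.pairwise_cons.mp hl with ⟨hle, ht⟩
    by_cases hx : h ≤ x
    · simp [hx, ih ht]
    · have hself : (h :: t).filter (fun y => decide (x < y)) = h :: t := by
        rw [List.filter_eq_self]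
        intro y hy
        simp only [decide_eq_true_eq]
        rcases List.mem_cons.mp hy with rfl | hy'
        · exact lt_of_not_ge hx
        · exact lt_of_lt_of_le (lt_of_not_ge hx) (hle y hy')
      rw [hself]
      simp [hx]

-- insort produces a permutation of x :: l
theorem pvInsortR_perm (x : Int) : ∀ (l : List Int), (pvInsortR x l).Perm (x :: l) := by
  intro l
  induction l with
  | nil => rfl
  | cons h t ih =>
    by_cases hx : x < h
    · simp [pvInsortR, hx]
    · simp only [pvInsortR, hx, if_false]
      exact (List.Perm.cons h ih).trans (List.Perm.swap x h t)

-- insort preserves sortedness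
theorem pvInsortR_pairwise (x : Int) :
    ∀ (l : List Int), l.Pairwise (· ≤ ·) → (pvInsortR x l).Pairwise (· ≤ ·) := by
  intro l hl
  induction l with
  | nil => simp [pvInsortR]
  | cons h t ih =>
    rcases List.pairwise_cons.mp hl with ⟨hle, ht⟩
    by_cases hx : x < h
    · simp only [pvInsortR, hx, if_true]
      refine List.pairwise_cons.mpr ⟨?_, hl⟩
      intro y hy
      rcases List.mem_cons.mp hy with rfl | hy
      · exact le_of_lt hx
      · exact le_trans (le_of_lt hx) (hle y hy)
    · simp only [pvInsortR, hx, if_false]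
      refine List.pairwise_cons.mpr ⟨?_, ih ht⟩
      intro y hy
      have := List.Perm.mem_iff (pvInsortR_perm x t) |>.mp hy
      rcases List.mem_cons.mp this with rfl | hy'
      · exact le_of_not_gt hx
      · exact hle y hy'

-- the loop invariant: equal res and pre components, sub ~ seen, sub sorted
theorem fold_agree :
    ∀ (rest : List Int) (res pre : Int) (sub seen : List Int),
      sub.Perm seen → sub.Pairwise (· ≤ ·) →
      (rest.foldl sortedSumStepA (res, sub, pre)).1
        = (rest.foldl sortedSumStepB (res, seen, pre)).1 := by
  intro rest
  induction rest with
  | nil => intro res pre sub seen _ _; rfl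
  | cons x rest ih =>
    intro res pre sub seen hperm hsort
    have hbisect : pvBisectR sub x = seen.countP (fun y => decide (y ≤ x)) := by
      unfold pvBisectR
      rw [sorted_takeWhile_eq_filter x sub hsort, ← List.countP_eq_length_filter]
      exact hperm.countP_eq _
    have hle : (seen.length : Int) - ((seen.filter (fun y => decide (x < y))).length : Int)
        = ((seen.countP (fun y => decide (y ≤ x)) : Nat) : Int) := by
      rw [← List.countP_eq_length_filter]
      have := countP_le_add_gt x seen
      omega
    have hsum : (sub.drop (seen.countP (fun y => decide (y ≤ x)))).sum
        = (seen.filter (fun y => decide (x < y))).sum := by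
      rw [← hbisect]
      unfold pvBisectR
      rw [sorted_drop_eq_filter x sub hsort]
      exact (hperm.filter _).sum_eq
    have hperm' : (pvInsortR x sub).Perm (seen ++ [x]) :=
      (pvInsortR_perm x sub).trans ((hperm.cons x).trans (List.perm_append_singleton x seen).symm)
    have hsort' := pvInsortR_pairwise x sub hsort
    simp only [List.foldl_cons, sortedSumStepA, sortedSumStepB, hle,
      hbisect, hsum, hperm.length_eq, Nat.cast_lt]
    exact ih _ _ _ _ hperm' hsort'

-- ===== VERDICT (by name: the statement is the Claim_ definition above) =====
theorem sortedSum_spec : Claim_equal_sortedSum := by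
  intro a _
  unfold Spec_sortedSum sortedSum sortedSum_alt
  exact fold_agree a 0 0 [] [] (List.Perm.refl _) (by simp)
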